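-- pv_equiv track=rewrite | github.com/doodmeister/human_ai_local | src/orchestration/autobiographical_promotion.py | _semantic_facts_from_norms
-- ===== SOURCE A (Python) =====
-- from typing import Any, Iterable, Sequence
--
-- def _semantic_facts_from_norms(norms: Sequence[str]) -> list[tuple[str, str, str]]:
--     facts: list[tuple[str, str, str]] = []
--     seen: set[tuple[str, str, str]] = set()
--     for norm in norms:
--         normalized = str(norm).strip()
--         lowered = normalized.lower()
--         fact: tuple[str, str, str] | None = None
--         if lowered.startswith("prefers "):
--             fact = ("user", "prefers", normalized[8:].strip())
--         elif lowered.startswith("likes "):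
--             fact = ("user", "prefers", normalized[6:].strip())
--         elif lowered.startswith("asks for "):
--             fact = ("user", "asks_for", normalized[9:].strip())
--         if fact is None or not fact[2]:
--             continue
--         dedupe_key = (fact[0].lower(), fact[1].lower(), fact[2].lower())
--         if dedupe_key in seen:
--             continue
--         seen.add(dedupe_key)
--         facts.append(fact)
--     return facts
-- ===== SOURCE B (Python) =====
-- _RULES = (("prefers ", "prefers"), ("likes ", "prefers"), ("asks for ", "asks_for"))
--
--
-- def _extract(norm):
--     normalized = str(norm).strip()
--     lowered = normalized.lower()
--     for prefix, predicate in _RULES: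
--         if lowered.startswith(prefix):
--             payload = normalized[len(prefix):].strip()
--             return ("user", predicate, payload) if payload else None
--     return None
--
--
-- def _key(fact):
--     return (fact[0].lower(), fact[1].lower(), fact[2].lower())
--
--
-- def _dedupe(facts):
--     if not facts:
--         return []
--     head = facts[0]
--     hk = _key(head)
--     return [head] + _dedupe([f for f in facts[1:] if _key(f) != hk])
--
--
-- def _semantic_facts_from_norms(norms):
--     facts = [f for f in map(_extract, norms) if f is not None]
--     return _dedupe(facts)
-- ===== Notes on version B (the rewrite author's own statement) =====
-- stated objective: alternative
-- what changed: Staged pipeline instead of A's single stateful loop: first extract all candidate facts, then deduplicate them with a recursive filter (keep head, recursively drop every later fact with the same lowercased key) -- no seen-set or running accumulator at all.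
import Mathlib
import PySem

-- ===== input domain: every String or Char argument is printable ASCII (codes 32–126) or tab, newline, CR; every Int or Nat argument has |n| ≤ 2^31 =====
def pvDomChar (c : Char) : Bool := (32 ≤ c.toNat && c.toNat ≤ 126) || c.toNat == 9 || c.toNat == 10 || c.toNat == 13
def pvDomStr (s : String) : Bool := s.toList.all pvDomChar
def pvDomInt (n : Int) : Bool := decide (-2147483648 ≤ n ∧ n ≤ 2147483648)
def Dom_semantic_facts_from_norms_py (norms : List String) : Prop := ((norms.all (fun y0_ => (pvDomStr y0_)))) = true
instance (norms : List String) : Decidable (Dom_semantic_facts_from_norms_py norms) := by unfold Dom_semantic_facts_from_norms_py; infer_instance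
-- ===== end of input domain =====

-- B replaces A's single stateful loop (result list + seen set) by a staged pipeline: extract all
-- candidate facts first, then deduplicate recursively by filtering later same-key facts (alternative).

-- ===== PORT A =====
-- loop body of A's 'for norm in norms'
def stepA (st : List (String × String × String) × PySem.Set (String × String × String))
    (norm : String) : List (String × String × String) × PySem.Set (String × String × String) :=
  let normalized := PySem.Str.strip norm
  let lowered := PySem.Str.lower normalized
  let fact : Option (String × String × String) :=
    if PySem.Str.startswith lowered "prefers " then
      some ("user", "prefers", PySem.Str.strip (PySem.Str.slice normalized (some 8) none))
    else if PySem.Str.startswith lowered "likes " then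
      some ("user", "prefers", PySem.Str.strip (PySem.Str.slice normalized (some 6) none))
    else if PySem.Str.startswith lowered "asks for " then
      some ("user", "asks_for", PySem.Str.strip (PySem.Str.slice normalized (some 9) none))
    else none
  match fact with
  | none => st
  | some f =>
    if f.2.2 = "" then st
    else
      let key := (PySem.Str.lower f.1, PySem.Str.lower f.2.1, PySem.Str.lower f.2.2)
      if key ∈ st.2 then st
      else (st.1 ++ [f], PySem.Set.add st.2 key)

def semantic_facts_from_norms_py (norms : List String) : List (String × String × String) :=
  (norms.foldl stepA ([], PySem.Set.empty)).1

-- ===== PORT B =====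
def pvRules : List (String × String) :=
  [("prefers ", "prefers"), ("likes ", "prefers"), ("asks for ", "asks_for")]

def pvExtractLoop (rules : List (String × String)) (normalized lowered : String) :
    Option (String × String × String) :=
  match rules with
  | [] => none
  | (pre, pred) :: rest =>
    if PySem.Str.startswith lowered pre then
      let payload := PySem.Str.strip (PySem.Str.slice normalized (some (PySem.Str.len pre)) none)
      if payload ≠ "" then some ("user", pred, payload) else none
    else pvExtractLoop rest normalized lowered

def pvExtract (norm : String) : Option (String × String × String) :=
  let normalized := PySem.Str.strip norm
  pvExtractLoop pvRules normalized (PySem.Str.lower normalized)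

def pvKey (f : String × String × String) : String × String × String :=
  (PySem.Str.lower f.1, PySem.Str.lower f.2.1, PySem.Str.lower f.2.2)

-- B's recursive '_dedupe': keep the head, drop every later fact with the same lowercased key
def pvDedupe : List (String × String × String) → List (String × String × String)
  | [] => []
  | f :: rest => f :: pvDedupe (rest.filter (fun g => pvKey g ≠ pvKey f))
termination_by facts => facts.length
decreasing_by
  simp only [List.length_unattach] at *
  exact Nat.lt_succ_of_le (le_trans (List.length_filter_le _ _) (by simp))

def semantic_facts_from_norms_py_alt (norms : List String) : List (String × String × String) :=
  pvDedupe ((norms.map pvExtract).filterMap id)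

-- ===== PRECONDITION & SPEC =====
def Spec_semantic_facts_from_norms_py (norms : List String) (out : List (String × String × String)) : Prop := out = semantic_facts_from_norms_py_alt norms
instance (norms : List String) (out : List (String × String × String)) : Decidable (Spec_semantic_facts_from_norms_py norms out) := by unfold Spec_semantic_facts_from_norms_py; infer_instance

-- ===== CLAIM =====
def Claim_equal_semantic_facts_from_norms_py : Prop := ∀ (norms : List String), Dom_semantic_facts_from_norms_py norms → Spec_semantic_facts_from_norms_py norms (semantic_facts_from_norms_py norms)

-- ===== LEMMAS AND PROOFS =====

-- A's dedupe loop over an already-extracted fact list, carrying the seen set.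
def dedupeAux (seen : PySem.Set (String × String × String)) :
    List (String × String × String) → List (String × String × String)
  | [] => []
  | f :: rest =>
    if pvKey f ∈ seen then dedupeAux seen rest
    else f :: dedupeAux (PySem.Set.add seen (pvKey f)) rest

-- A's classify-then-filter step, expressed through B's extractor.
theorem stepA_eq (st : List (String × String × String) × PySem.Set (String × String × String))
    (norm : String) :
    stepA st norm = match pvExtract norm with
      | none => st
      | some f =>
        if pvKey f ∈ st.2 then st
        else (st.1 ++ [f], PySem.Set.add st.2 (pvKey f)) := by
  simp only [stepA, pvExtract, pvExtractLoop, pvRules, pvKey]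
  split_ifs <;> simp_all

theorem foldl_stepA_eq (norms : List String)
    (acc : List (String × String × String)) (seen : PySem.Set (String × String × String)) :
    (norms.foldl stepA (acc, seen)).1 =
      acc ++ dedupeAux seen (norms.filterMap pvExtract) := by
  induction norms generalizing acc seen with
  | nil => simp [dedupeAux]
  | cons norm rest ih =>
    rw [List.foldl_cons, stepA_eq]
    cases hpe : pvExtract norm with
    | none => simpa [List.filterMap_cons, hpe] using ih acc seen
    | some f =>
      simp only [List.filterMap_cons, hpe]
      by_cases hk : pvKey f ∈ seen
      · simpa [dedupeAux, hk] using ih acc seen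
      · simpa [dedupeAux, hk] using ih (acc ++ [f]) (PySem.Set.add seen (pvKey f))

theorem dedupeAux_eq (facts : List (String × String × String))
    (seen : PySem.Set (String × String × String)) :
    dedupeAux seen facts = pvDedupe (facts.filter (fun g => pvKey g ∉ seen)) := by
  induction facts generalizing seen with
  | nil => simp [dedupeAux, pvDedupe]
  | cons f rest ih =>
    by_cases hk : pvKey f ∈ seen
    · simpa [dedupeAux, hk, List.filter_cons] using ih seen
    · rw [List.filter_cons]
      simp only [hk, not_false_iff, decide_true, if_pos]
      rw [dedupeAux, if_neg hk, pvDedupe, ih (PySem.Set.add seen (pvKey f)),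
        List.filter_filter]
      have hf : List.filter (fun g => decide (pvKey g ∉ PySem.Set.add seen (pvKey f))) rest =
          List.filter (fun a => decide (pvKey a ≠ pvKey f) && decide (pvKey a ∉ seen)) rest := by
        apply List.filter_congr
        intro g _
        by_cases h1 : pvKey g = pvKey f <;> by_cases h2 : pvKey g ∈ seen <;>
          simp [PySem.Set.mem_add, h1, h2]
      rw [hf]

theorem filterMap_id_map (norms : List String) :
    (norms.map pvExtract).filterMap id = norms.filterMap pvExtract := by
  induction norms with
  | nil => rfl
  | cons a l ih =>
    cases h : pvExtract a with
    | none =>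
      rw [List.map_cons, List.filterMap_cons_none (by rw [id_eq]; exact h),
        List.filterMap_cons_none h, ih]
    | some b =>
      rw [List.map_cons, List.filterMap_cons_some (by rw [id_eq]; exact h),
        List.filterMap_cons_some h, ih]

-- ===== VERDICT =====
theorem semantic_facts_from_norms_py_spec : Claim_equal_semantic_facts_from_norms_py := by
  intro norms _
  unfold Spec_semantic_facts_from_norms_py semantic_facts_from_norms_py semantic_facts_from_norms_py_alt
  rw [foldl_stepA_eq, List.nil_append, dedupeAux_eq]
  have h1 : List.filter (fun g => decide (pvKey g ∉ (PySem.Set.empty : PySem.Set (String × String × String)))) (norms.filterMap pvExtract) = norms.filterMap pvExtract := by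
    apply List.filter_eq_self.mpr
    intro a _
    simp [PySem.Set.empty]
  rw [h1, filterMap_id_map]
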